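-- pv_equiv track=rewrite | github.com/networkx/networkx | networkx/algorithms/isomorphism/vf2pp_helpers/node_ordering.py | _rarest_nodes
-- ===== SOURCE A (Python) =====
-- def _rarest_nodes(V1_unordered, G1_labels, label_rarity):
--     rare = []
--     rarest = float("inf")
--     for n in V1_unordered:
--         if label_rarity[G1_labels[n]] < rarest:
--             rarest = label_rarity[G1_labels[n]]
--             rare = [n]
--             continue
--         if label_rarity[G1_labels[n]] == rarest:
--             rare.append(n)
--
--     return rare
-- ===== SOURCE B (Python) =====
-- def _rarest_nodes(V1_unordered, G1_labels, label_rarity):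
--     if not V1_unordered:
--         return []
--     rarest = min(label_rarity[G1_labels[n]] for n in V1_unordered)
--     return [n for n in V1_unordered if label_rarity[G1_labels[n]] == rarest]
-- ===== Notes on version B (the rewrite author's own statement) =====
-- stated objective: simpler
-- what changed: Replaced the running-minimum fold that rebuilds/extends the result list as it scans by a two-pass compute-then-filter: first take min() of the rarities, then one comprehension collecting the nodes attaining it.
import Mathlib
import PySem

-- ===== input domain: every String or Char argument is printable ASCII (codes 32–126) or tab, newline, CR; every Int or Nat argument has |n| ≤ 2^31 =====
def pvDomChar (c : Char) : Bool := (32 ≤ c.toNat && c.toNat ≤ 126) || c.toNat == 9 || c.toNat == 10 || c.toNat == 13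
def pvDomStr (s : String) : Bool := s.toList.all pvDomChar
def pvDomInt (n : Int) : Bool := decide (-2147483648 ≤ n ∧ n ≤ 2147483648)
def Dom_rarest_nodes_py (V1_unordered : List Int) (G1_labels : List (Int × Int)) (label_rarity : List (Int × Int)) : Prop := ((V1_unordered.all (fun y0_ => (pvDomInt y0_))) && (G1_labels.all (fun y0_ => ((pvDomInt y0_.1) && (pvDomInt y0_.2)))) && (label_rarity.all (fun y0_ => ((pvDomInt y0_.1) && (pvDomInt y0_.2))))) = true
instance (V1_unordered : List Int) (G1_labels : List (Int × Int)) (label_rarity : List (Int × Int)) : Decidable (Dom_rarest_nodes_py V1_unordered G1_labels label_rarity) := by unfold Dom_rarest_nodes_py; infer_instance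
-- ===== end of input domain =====

-- B replaces A's running-minimum fold with a two-pass compute-min-then-filter; same O(n), chosen for simplicity.

-- dict lookup (first match), shared by both ports
def pvLook (d : List (Int × Int)) (k : Int) : Option Int :=
  (d.find? (fun p => p.1 == k)).map (·.2)

-- label_rarity[G1_labels[n]] (none = KeyError)
def pvRarity? (G1_labels label_rarity : List (Int × Int)) (n : Int) : Option Int :=
  (pvLook G1_labels n).bind (pvLook label_rarity)

-- ===== PORT A =====
-- loop body of A: state = (rare, rarest), rarest = none models float("inf")
def pvStepA (G1_labels label_rarity : List (Int × Int))
    (s : List Int × Option Int) (n : Int) : List Int × Option Int :=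
  match pvRarity? G1_labels label_rarity n, s.2 with
  | none, _ => s            -- Python raises KeyError here; excluded by Pre_
  | some r, none => ([n], some r)
  | some r, some m =>
      if r < m then ([n], some r)
      else if r = m then (s.1 ++ [n], s.2)
      else s

def rarest_nodes_py (V1_unordered : List Int) (G1_labels : List (Int × Int)) (label_rarity : List (Int × Int)) : List Int :=
  (V1_unordered.foldl (pvStepA G1_labels label_rarity) (([] : List Int), (none : Option Int))).1

-- ===== PORT B =====
def rarest_nodes_py_alt (V1_unordered : List Int) (G1_labels : List (Int × Int)) (label_rarity : List (Int × Int)) : List Int :=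
  if V1_unordered = [] then []
  else
    match PySem.List.min? (V1_unordered.filterMap (pvRarity? G1_labels label_rarity)) (fun x => x) with
    | none => []
    | some m => V1_unordered.filter (fun n => pvRarity? G1_labels label_rarity n == some m)

-- ===== PRECONDITION & SPEC =====
-- Pre_ excludes inputs where some node's label or its rarity is missing from the dicts: there Python A raises KeyError.
def Pre_rarest_nodes_py (V1_unordered : List Int) (G1_labels : List (Int × Int)) (label_rarity : List (Int × Int)) : Prop :=
  ∀ n ∈ V1_unordered, (pvRarity? G1_labels label_rarity n).isSome = true
instance (V1_unordered : List Int) (G1_labels : List (Int × Int)) (label_rarity : List (Int × Int)) : Decidable (Pre_rarest_nodes_py V1_unordered G1_labels label_rarity) := by unfold Pre_rarest_nodes_py; infer_instance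

def pvWitness_rarest_nodes_py : List Int × (List (Int × Int)) × (List (Int × Int)) :=
  ([0, 1, 2], [(0, 5), (1, 6), (2, 5)], [(5, 1), (6, 2)])

def Spec_rarest_nodes_py (V1_unordered : List Int) (G1_labels : List (Int × Int)) (label_rarity : List (Int × Int)) (out : List Int) : Prop := out = rarest_nodes_py_alt V1_unordered G1_labels label_rarity
instance (V1_unordered : List Int) (G1_labels : List (Int × Int)) (label_rarity : List (Int × Int)) (out : List Int) : Decidable (Spec_rarest_nodes_py V1_unordered G1_labels label_rarity out) := by unfold Spec_rarest_nodes_py; infer_instance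

-- ===== CLAIM (what is proved, stated in full; the proofs are below) =====
def Claim_equal_rarest_nodes_py : Prop := ∀ (V1_unordered : List Int) (G1_labels : List (Int × Int)) (label_rarity : List (Int × Int)), Dom_rarest_nodes_py V1_unordered G1_labels label_rarity → Pre_rarest_nodes_py V1_unordered G1_labels label_rarity → Spec_rarest_nodes_py V1_unordered G1_labels label_rarity (rarest_nodes_py V1_unordered G1_labels label_rarity)

-- ===== LEMMAS AND PROOFS =====

-- Characterisation of A's fold from a state (rare, some m)
theorem foldA_char (G1 lr : List (Int × Int)) :
    ∀ (l : List Int) (rare : List Int) (m : Int),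
    (∀ n ∈ l, (pvRarity? G1 lr n).isSome = true) →
    ∃ M : Int,
      (l.foldl (pvStepA G1 lr) (rare, some m)).2 = some M ∧
      M ≤ m ∧
      (∀ n ∈ l, ∀ r, pvRarity? G1 lr n = some r → M ≤ r) ∧
      (M = m ∨ ∃ n ∈ l, pvRarity? G1 lr n = some M) ∧
      (l.foldl (pvStepA G1 lr) (rare, some m)).1 =
        (if M < m then l.filter (fun n => pvRarity? G1 lr n == some M)
         else rare ++ l.filter (fun n => pvRarity? G1 lr n == some m)) := by
  intro l
  induction l with
  | nil =>
    intro rare m _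
    exact ⟨m, rfl, le_refl m, by simp, Or.inl rfl, by simp⟩
  | cons a tl ih =>
    intro rare m h
    have ha : (pvRarity? G1 lr a).isSome = true := h a (by simp)
    obtain ⟨r, hr⟩ := Option.isSome_iff_exists.mp ha
    have htl : ∀ n ∈ tl, (pvRarity? G1 lr n).isSome = true := fun n hn => h n (by simp [hn])
    rcases lt_trichotomy r m with hrm | hrm | hrm
    · -- r < m : state resets to ([a], some r)
      have hstep : pvStepA G1 lr (rare, some m) a = ([a], some r) := by
        simp [pvStepA, hr, hrm]
      obtain ⟨M, h2, hle, hmin, hmem, h1⟩ := ih [a] r htl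
      refine ⟨M, ?_, ?_, ?_, ?_, ?_⟩
      · simpa [hstep] using h2
      · omega
      · intro n hn r' hr'
        rcases List.mem_cons.mp hn with rfl | hn
        · rw [hr] at hr'; injection hr' with e; omega
        · exact hmin n hn r' hr'
      · right
        rcases hmem with rfl | ⟨n, hn, hfn⟩
        · exact ⟨a, by simp, hr⟩
        · exact ⟨n, by simp [hn], hfn⟩
      · rw [List.foldl_cons, hstep]
        have hMm : M < m := lt_of_le_of_lt hle hrm
        rw [if_pos hMm]
        rcases lt_or_eq_of_le hle with hMr | rfl
        · rw [h1, if_pos hMr]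
          have : (pvRarity? G1 lr a == some M) = false := by
            simp [hr]; omega
          simp [this]
        · rw [h1, if_neg (lt_irrefl M)]
          have : (pvRarity? G1 lr a == some M) = true := by simp [hr]
          simp [this]
    · -- r = m : append a
      subst hrm
      have hstep : pvStepA G1 lr (rare, some r) a = (rare ++ [a], some r) := by
        simp [pvStepA, hr]
      obtain ⟨M, h2, hle, hmin, hmem, h1⟩ := ih (rare ++ [a]) r htl
      refine ⟨M, ?_, hle, ?_, ?_, ?_⟩
      · simpa [hstep] using h2
      · intro n hn r' hr'
        rcases List.mem_cons.mp hn with rfl | hn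
        · rw [hr] at hr'; injection hr' with e; omega
        · exact hmin n hn r' hr'
      · rcases hmem with rfl | ⟨n, hn, hfn⟩
        · exact Or.inl rfl
        · exact Or.inr ⟨n, by simp [hn], hfn⟩
      · rw [List.foldl_cons, hstep]
        rcases lt_or_eq_of_le hle with hMr | rfl
        · rw [h1, if_pos hMr, if_pos hMr]
          have : (pvRarity? G1 lr a == some M) = false := by
            simp [hr]; omega
          simp [this]
        · rw [h1, if_neg (lt_irrefl M), if_neg (lt_irrefl M)]
          have : (pvRarity? G1 lr a == some M) = true := by simp [hr]
          simp [this]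
    · -- r > m : state unchanged
      have hstep : pvStepA G1 lr (rare, some m) a = (rare, some m) := by
        have hx1 : ¬ r < m := by omega
        have hx2 : r ≠ m := by omega
        simp [pvStepA, hr, hx1, hx2]
      obtain ⟨M, h2, hle, hmin, hmem, h1⟩ := ih rare m htl
      refine ⟨M, ?_, hle, ?_, ?_, ?_⟩
      · simpa [hstep] using h2
      · intro n hn r' hr'
        rcases List.mem_cons.mp hn with rfl | hn
        · rw [hr] at hr'; injection hr' with e
          have := le_trans hle (le_of_lt hrm); omega
        · exact hmin n hn r' hr'
      · rcases hmem with rfl | ⟨n, hn, hfn⟩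
        · exact Or.inl rfl
        · exact Or.inr ⟨n, by simp [hn], hfn⟩
      · rw [List.foldl_cons, hstep, h1]
        have hne1 : (pvRarity? G1 lr a == some M) = false := by
          simp [hr]
          have := le_trans hle (le_of_lt (by omega : m < r)); omega
        have hne2 : (pvRarity? G1 lr a == some m) = false := by
          simp [hr]; omega
        split_ifs with hMm
        · simp [hne1]
        · simp [hne2]

-- ===== VERDICT (by name: the statement is the Claim_ definition above) =====
theorem rarest_nodes_py_spec : Claim_equal_rarest_nodes_py := by
  intro V1 G1 lr _ hpre
  unfold Spec_rarest_nodes_py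
  cases V1 with
  | nil => rfl
  | cons a tl =>
    have ha : (pvRarity? G1 lr a).isSome = true := hpre a (by simp)
    obtain ⟨r, hr⟩ := Option.isSome_iff_exists.mp ha
    have htl : ∀ n ∈ tl, (pvRarity? G1 lr n).isSome = true := fun n hn => hpre n (by simp [hn])
    obtain ⟨M, h2, hle, hmin, hmem, h1⟩ := foldA_char G1 lr tl [a] r htl
    -- A's value
    have hstep : pvStepA G1 lr ([], none) a = ([a], some r) := by
      simp [pvStepA, hr]
    have hA : rarest_nodes_py (a :: tl) G1 lr =
        (if M < r then tl.filter (fun n => pvRarity? G1 lr n == some M)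
         else [a] ++ tl.filter (fun n => pvRarity? G1 lr n == some r)) := by
      unfold rarest_nodes_py
      rw [List.foldl_cons, hstep, h1]
    -- B's min
    have hfm : (a :: tl).filterMap (pvRarity? G1 lr) = r :: tl.filterMap (pvRarity? G1 lr) := by
      simp [hr]
    obtain ⟨M', hM'⟩ := Option.isSome_iff_exists.mp (by
      rw [Option.isSome_iff_ne_none]
      intro hcon
      rw [PySem.List.min?_eq_none_iff] at hcon
      rw [hfm] at hcon
      exact List.cons_ne_nil _ _ hcon :
        (PySem.List.min? ((a :: tl).filterMap (pvRarity? G1 lr)) (fun x => x)).isSome = true)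
    have hMmem : M' ∈ (a :: tl).filterMap (pvRarity? G1 lr) := PySem.List.min?_mem hM'
    have hMmin : ∀ y ∈ (a :: tl).filterMap (pvRarity? G1 lr), M' ≤ y := by
      intro y hy; exact PySem.List.min?_isMin hM' y hy
    -- M' = M
    have hMM : M' = M := by
      have h1' : M ≤ M' := by
        rw [List.mem_filterMap] at hMmem
        obtain ⟨n, hn, hfn⟩ := hMmem
        rcases List.mem_cons.mp hn with rfl | hn
        · rw [hr] at hfn; injection hfn with e; omega
        · exact hmin n hn M' hfn
      have h2' : M' ≤ M := by
        rcases hmem with rfl | ⟨n, hn, hfn⟩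
        · exact hMmin M (by rw [hfm]; simp)
        · exact hMmin M (List.mem_filterMap.mpr ⟨n, by simp [hn], hfn⟩)
      omega
    subst hMM
    -- B's value
    have hB : rarest_nodes_py_alt (a :: tl) G1 lr =
        (a :: tl).filter (fun n => pvRarity? G1 lr n == some M') := by
      unfold rarest_nodes_py_alt
      rw [if_neg (List.cons_ne_nil a tl), hM']
    rw [hA, hB]
    rcases lt_or_eq_of_le hle with hMr | rfl
    · rw [if_pos hMr]
      have : (pvRarity? G1 lr a == some M') = false := by
        simp [hr]; omega
      simp [this]
    · rw [if_neg (lt_irrefl M')]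
      have : (pvRarity? G1 lr a == some M') = true := by simp [hr]
      simp [this]
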